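-- pv_equiv track=rewrite | github.com/alexandreb09/ZZ1_WordCloud_Projet_Sem2 | LecturePDF.py | LongueurChaine
-- ===== SOURCE A (Python) =====
-- def LongueurChaine(chaine):                             # Donne l'indice de fin des mots clés
--     if chaine[0] == ' ': chaine=chaine[1:]
--     nbMot = nbLigne = 0                                 # et la chaine sans les répétitions
--     ind = 0
--     while nbMot < 10 and nbLigne < 2:
--         if chaine[ind] == ',': nbMot+=1
--         if chaine[ind] == '\n': nbLigne+=1
--         ind+=1
--     return (ind,chaine[:ind+1])
-- ===== SOURCE B (Python) =====
-- def LongueurChaine(chaine):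
--     if chaine[0] == ' ':
--         chaine = chaine[1:]
--     commas = [i for i, c in enumerate(chaine) if c == ',']
--     newlines = [i for i, c in enumerate(chaine) if c == '\n']
--     candidates = []
--     if len(commas) >= 10:
--         candidates.append(commas[9])
--     if len(newlines) >= 2:
--         candidates.append(newlines[1])
--     ind = min(candidates) + 1
--     return (ind, chaine[:ind + 1])
-- ===== Notes on version B (the rewrite author's own statement) =====
-- stated objective: alternative
-- what changed: Replaces A's single scan with two running counters by building the position lists of commas and newlines and taking the minimum of the 10th comma / 2nd newline positions; Pre_ excludes the inputs on which A raises IndexError (empty string, or fewer than 10 commas and fewer than 2 newlines).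
import Mathlib
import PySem

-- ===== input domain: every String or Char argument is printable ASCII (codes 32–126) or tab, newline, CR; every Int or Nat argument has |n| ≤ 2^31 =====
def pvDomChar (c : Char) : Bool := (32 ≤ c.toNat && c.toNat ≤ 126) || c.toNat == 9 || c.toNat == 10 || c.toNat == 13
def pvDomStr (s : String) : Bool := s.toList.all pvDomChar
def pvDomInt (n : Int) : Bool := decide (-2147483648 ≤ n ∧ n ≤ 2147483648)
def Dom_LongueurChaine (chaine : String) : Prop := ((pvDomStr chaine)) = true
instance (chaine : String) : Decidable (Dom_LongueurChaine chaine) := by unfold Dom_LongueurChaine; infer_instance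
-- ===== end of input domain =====

-- B replaces A's one scan with two running counters by collecting the comma and newline
-- position lists and taking the minimum of the 10th comma / 2nd newline positions
-- (alternative decomposition, same cost).

-- ===== PORT A =====
-- A's while loop: walks the characters, bumping nbMot on ',' and nbLigne on '\n';
-- returns the index just past the trigger char, or none when it runs off the end (IndexError).
def goA : List Char → Nat → Nat → Nat → Option Nat
  | cs, nbMot, nbLigne, ind =>
    if nbMot < 10 ∧ nbLigne < 2 then
      match cs with
      | [] => none  -- chaine[ind] raises IndexError
      | c :: rest =>
          goA rest (if c = ',' then nbMot + 1 else nbMot)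
                   (if c = '\n' then nbLigne + 1 else nbLigne) (ind + 1)
    else some ind

def LongueurChaine (chaine : String) : Int × String :=
  let cs0 := chaine.toList
  let cs := if cs0.head? = some ' ' then cs0.tail else cs0   -- if chaine[0] == ' ': chaine = chaine[1:]
  match goA cs 0 0 0 with
  | some ind => ((ind : Int), String.ofList (cs.take (ind + 1)))
  | none => (0, "")   -- IndexError in Python (excluded by Pre_)

-- ===== PORT B =====
-- [i for i, c in enumerate(chaine) if c == ch] as a single pass with a running index
def posList : List Char → Char → Nat → List Nat
  | [], _, _ => []
  | c :: cs, ch, i => if c = ch then i :: posList cs ch (i + 1) else posList cs ch (i + 1)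

def LongueurChaine_alt (chaine : String) : Int × String :=
  let cs0 := chaine.toList
  let cs := if cs0.head? = some ' ' then cs0.tail else cs0
  let commas := posList cs ',' 0
  let newlines := posList cs '\n' 0
  let cand1 := if 10 ≤ commas.length then [commas.getD 9 0] else []
  let cand := if 2 ≤ newlines.length then cand1 ++ [newlines.getD 1 0] else cand1
  match PySem.List.min? cand (fun x => x) with
  | some t => ((t : Int) + 1, String.ofList (cs.take (t + 2)))
  | none => (0, "")   -- min([]) raises ValueError in Python (excluded by Pre_)

-- ===== PRECONDITION & SPEC =====
-- Pre_ excludes exactly the inputs where Python A raises IndexError: the empty string,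
-- and strings whose (space-stripped) text never reaches 10 commas nor 2 newlines.
def Pre_LongueurChaine (chaine : String) : Prop :=
  chaine.toList ≠ [] ∧
  (let cs := if chaine.toList.head? = some ' ' then chaine.toList.tail else chaine.toList
   10 ≤ cs.count ',' ∨ 2 ≤ cs.count '\n')
instance (chaine : String) : Decidable (Pre_LongueurChaine chaine) := by
  unfold Pre_LongueurChaine; infer_instance

def pvWitness_LongueurChaine : String := "a,b,c,d,e,f\ng,h\ni"

def Spec_LongueurChaine (chaine : String) (out : Int × String) : Prop := out = LongueurChaine_alt chaine
instance (chaine : String) (out : Int × String) : Decidable (Spec_LongueurChaine chaine out) := by unfold Spec_LongueurChaine; infer_instance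

-- ===== CLAIM (what is proved, stated in full; the proofs are below) =====
def Claim_equal_LongueurChaine : Prop := ∀ (chaine : String), Dom_LongueurChaine chaine → Pre_LongueurChaine chaine → Spec_LongueurChaine chaine (LongueurChaine chaine)

-- ===== LEMMAS AND PROOFS =====

-- proof-side helper: A's loop viewed as "index of the n-th occurrence of ch from position i"
def nthIdx : List Char → Char → Nat → Nat → Option Nat
  | [], _, _, _ => none
  | c :: cs, ch, n, i =>
    if c = ch then
      if n = 1 then some i else nthIdx cs ch (n - 1) (i + 1)
    else nthIdx cs ch n (i + 1)

-- min on Option Nat with none = +∞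
def omin : Option Nat → Option Nat → Option Nat
  | none, o => o
  | some p, none => some p
  | some p, some q => some (min p q)

theorem nthIdx_ge (cs : List Char) (ch : Char) (n i : Nat) (p : Nat)
    (h : nthIdx cs ch n i = some p) : i ≤ p := by
  induction cs generalizing n i with
  | nil => simp [nthIdx] at h
  | cons c cs ih =>
    simp only [nthIdx] at h
    split at h
    · split at h
      · simp at h; omega
      · have := ih _ _ h; omega
    · have := ih _ _ h; omega

theorem posList_length (cs : List Char) (ch : Char) (i : Nat) :
    (posList cs ch i).length = cs.count ch := by
  induction cs generalizing i with
  | nil => simp [posList]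
  | cons c cs ih =>
    by_cases hc : c = ch
    · simp [posList, hc, ih]
    · simp [posList, hc, ih]

theorem posList_get? (cs : List Char) (ch : Char) (i k : Nat) :
    (posList cs ch i)[k]? = nthIdx cs ch (k + 1) i := by
  induction cs generalizing i k with
  | nil => simp [posList, nthIdx]
  | cons c cs ih =>
    by_cases hc : c = ch
    · cases k with
      | zero => simp [posList, nthIdx, hc]
      | succ k => simp [posList, nthIdx, hc, ih]
    · simp [posList, nthIdx, hc, ih]

-- the bridge: A's scanning loop equals min of the two nth-occurrence searches, plus one
theorem goA_eq_omin (cs : List Char) (m l ind : Nat) (hm : m < 10) (hl : l < 2) :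
    goA cs m l ind = (omin (nthIdx cs ',' (10 - m) ind) (nthIdx cs '\n' (2 - l) ind)).map (· + 1) := by
  induction cs generalizing m l ind with
  | nil => simp [goA, hm, hl, nthIdx, omin]
  | cons c cs ih =>
    rw [goA.eq_def]; dsimp only; rw [if_pos ⟨hm, hl⟩]
    by_cases hc : c = ','
    · subst hc
      rw [if_pos rfl, if_neg (by decide : ¬((',' : Char) = '\n'))]
      have hnl : nthIdx (',' :: cs) '\n' (2 - l) ind = nthIdx cs '\n' (2 - l) (ind + 1) := by
        simp [nthIdx]
      by_cases h9 : m = 9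
      · subst h9
        have hstop : goA cs 10 l (ind + 1) = some (ind + 1) := by
          rw [goA.eq_def]; simp
        have hcomma : nthIdx (',' :: cs) ',' (10 - 9) ind = some ind := by
          simp [nthIdx]
        rw [hstop, hcomma, hnl]
        cases hq : nthIdx cs '\n' (2 - l) (ind + 1) with
        | none => simp [omin]
        | some q =>
          have := nthIdx_ge _ _ _ _ _ hq
          simp [omin, Nat.min_eq_left (by omega : ind ≤ q)]
      · rw [ih (m + 1) l (ind + 1) (by omega) hl]
        have hcomma : nthIdx (',' :: cs) ',' (10 - m) ind = nthIdx cs ',' (10 - (m + 1)) (ind + 1) := by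
          have h1 : 10 - m ≠ 1 := by omega
          simp [nthIdx, h1]
          congr 1; omega
        rw [hcomma, hnl]
    · by_cases hn : c = '\n'
      · subst hn
        rw [if_neg hc, if_pos rfl]
        have hcm : nthIdx ('\n' :: cs) ',' (10 - m) ind = nthIdx cs ',' (10 - m) (ind + 1) := by
          simp [nthIdx]
        by_cases h1l : l = 1
        · subst h1l
          have hstop : goA cs m 2 (ind + 1) = some (ind + 1) := by
            rw [goA.eq_def]; simp
          have hnewl : nthIdx ('\n' :: cs) '\n' (2 - 1) ind = some ind := by
            simp [nthIdx]
          rw [hstop, hcm, hnewl]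
          cases hq : nthIdx cs ',' (10 - m) (ind + 1) with
          | none => simp [omin]
          | some q =>
            have := nthIdx_ge _ _ _ _ _ hq
            simp [omin, Nat.min_eq_right (by omega : ind ≤ q)]
        · have h0 : l = 0 := by omega
          subst h0
          rw [ih m 1 (ind + 1) hm (by omega)]
          have hnewl : nthIdx ('\n' :: cs) '\n' (2 - 0) ind = nthIdx cs '\n' 1 (ind + 1) := by
            simp [nthIdx]
          rw [hcm, hnewl]
      · rw [if_neg hc, if_neg hn]
        rw [ih m l (ind + 1) hm hl]
        have h1 : nthIdx (c :: cs) ',' (10 - m) ind = nthIdx cs ',' (10 - m) (ind + 1) := by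
          simp [nthIdx, hc]
        have h2 : nthIdx (c :: cs) '\n' (2 - l) ind = nthIdx cs '\n' (2 - l) (ind + 1) := by
          simp [nthIdx, hn]
        rw [h1, h2]

-- ===== VERDICT (by name: the statement is the Claim_ definition above) =====
theorem LongueurChaine_spec : Claim_equal_LongueurChaine := by
  intro chaine _ hpre
  unfold Spec_LongueurChaine LongueurChaine LongueurChaine_alt
  obtain ⟨hne, hcnt⟩ := hpre
  simp only at hcnt ⊢
  set cs := if chaine.toList.head? = some ' ' then chaine.toList.tail else chaine.toList with hcs
  rw [goA_eq_omin cs 0 0 0 (by norm_num) (by norm_num)]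
  simp only [Nat.sub_zero]
  have hlc : (posList cs ',' 0).length = cs.count ',' := posList_length ..
  have hln : (posList cs '\n' 0).length = cs.count '\n' := posList_length ..
  have hgc : (posList cs ',' 0)[9]? = nthIdx cs ',' 10 0 := posList_get? ..
  have hgn : (posList cs '\n' 0)[1]? = nthIdx cs '\n' 2 0 := posList_get? ..
  cases hp : nthIdx cs ',' 10 0 with
  | none =>
    have hlen10 : ¬ 10 ≤ (posList cs ',' 0).length := by
      intro h
      have := List.getElem?_eq_getElem (l := posList cs ',' 0) (i := 9) (by omega)
      rw [hgc, hp] at this; simp at this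
    cases hq : nthIdx cs '\n' 2 0 with
    | none =>
      exfalso
      have hlen2 : ¬ 2 ≤ (posList cs '\n' 0).length := by
        intro h
        have := List.getElem?_eq_getElem (l := posList cs '\n' 0) (i := 1) (by omega)
        rw [hgn, hq] at this; simp at this
      rcases hcnt with h | h
      · exact hlen10 (by omega)
      · exact hlen2 (by omega)
    | some q =>
      have hlen2 : 2 ≤ (posList cs '\n' 0).length := by
        by_contra h
        have : (posList cs '\n' 0)[1]? = none := by
          rw [List.getElem?_eq_none_iff]; omega
        rw [hgn, hq] at this; simp at this
      have hget : (posList cs '\n' 0)[1]?.getD 0 = q := by rw [hgn, hq]; rfl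
      simp [omin, hlen10, hlen2, hget, PySem.List.min?]
  | some p =>
    have hlen10 : 10 ≤ (posList cs ',' 0).length := by
      by_contra h
      have : (posList cs ',' 0)[9]? = none := by
        rw [List.getElem?_eq_none_iff]; omega
      rw [hgc, hp] at this; simp at this
    have hgetc : (posList cs ',' 0)[9]?.getD 0 = p := by rw [hgc, hp]; rfl
    cases hq : nthIdx cs '\n' 2 0 with
    | none =>
      have hlen2 : ¬ 2 ≤ (posList cs '\n' 0).length := by
        intro h
        have := List.getElem?_eq_getElem (l := posList cs '\n' 0) (i := 1) (by omega)
        rw [hgn, hq] at this; simp at this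
      simp [omin, hlen10, hlen2, hgetc, PySem.List.min?]
    | some q =>
      have hlen2 : 2 ≤ (posList cs '\n' 0).length := by
        by_contra h
        have : (posList cs '\n' 0)[1]? = none := by
          rw [List.getElem?_eq_none_iff]; omega
        rw [hgn, hq] at this; simp at this
      have hgetn : (posList cs '\n' 0)[1]?.getD 0 = q := by rw [hgn, hq]; rfl
      simp [omin, hlen10, hlen2, hgetc, hgetn, PySem.List.min?]
      by_cases hlt : q < p
      · rw [if_pos hlt]
        have h1 : min p q = q := Nat.min_eq_right (Nat.le_of_lt hlt)
        simp [h1]; omega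
      · rw [if_neg hlt]
        have h1 : min p q = p := Nat.min_eq_left (by omega)
        simp [h1]; omega
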